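-- pv_equiv track=rewrite | github.com/RomanL91/metiz_tenants_test | src/app_estimate_imports/handlers/grid_handler.py | _extract_column_headers
-- ===== SOURCE A (Python) =====
-- def _extract_column_headers(rows, max_cols: int):
--     """Извлекает заголовки колонок из первых строк"""
--     col_headers = []
--     for col_idx in range(max_cols):
--         header = ""
--         for row in rows[:8]:  # Ищем в первых 8 строках
--             cells = row.get("cells") or []
--             if col_idx < len(cells):
--                 val = (cells[col_idx] or "").strip()
--                 if val:
--                     header = val
--                     break
--         col_headers.append(header)
--     return col_headers
-- ===== SOURCE B (Python) =====
-- def _extract_column_headers(rows, max_cols: int):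
--     """Row-major single pass over rows[:8], filling back-to-front so the
--     earliest non-empty value per column wins (A scans per-column instead)."""
--     n = max(max_cols, 0)
--     col_headers = [""] * n
--     for row in reversed(rows[:8]):
--         cells = row.get("cells") or []
--         for col_idx, cell in enumerate(cells[:n]):
--             val = (cell or "").strip()
--             if val:
--                 col_headers[col_idx] = val
--     return col_headers
-- ===== Notes on version B (the rewrite author's own statement) =====
-- stated objective: faster
-- what changed: Replaces A's per-column independent scans of rows[:8] (column-major, re-slicing rows and re-doing the dict lookup for every (column,row) pair, with break on first non-empty cell) by a single row-major pass that walks rows[:8] back-to-front and overwrites each column slot with any non-empty stripped value, so the earliest row's value wins; result list preallocated with [''] * max(max_cols, 0).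
import Mathlib
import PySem

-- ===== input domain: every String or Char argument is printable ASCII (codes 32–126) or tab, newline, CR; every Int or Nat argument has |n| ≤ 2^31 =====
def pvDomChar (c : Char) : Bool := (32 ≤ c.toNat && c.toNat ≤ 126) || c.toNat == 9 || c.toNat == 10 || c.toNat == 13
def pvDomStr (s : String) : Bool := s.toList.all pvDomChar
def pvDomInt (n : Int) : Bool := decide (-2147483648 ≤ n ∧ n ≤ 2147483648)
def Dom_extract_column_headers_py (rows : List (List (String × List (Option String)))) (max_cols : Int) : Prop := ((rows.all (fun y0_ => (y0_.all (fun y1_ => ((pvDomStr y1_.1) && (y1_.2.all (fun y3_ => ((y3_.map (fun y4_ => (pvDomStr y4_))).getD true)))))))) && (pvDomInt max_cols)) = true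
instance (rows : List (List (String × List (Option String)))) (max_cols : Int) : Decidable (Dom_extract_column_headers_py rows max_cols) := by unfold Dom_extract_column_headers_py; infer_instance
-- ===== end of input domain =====

-- B replaces A's per-column scans of rows[:8] with one row-major pass filling the result
-- back-to-front (earliest row wins by overwriting); alternative decomposition, same result.

-- ===== PORT A =====

-- row.get("cells") or []  (shared by both ports: same dict lookup in A and B)
def pvGetCells (row : List (String × List (Option String))) : List (Option String) :=
  ((PySem.Dict.mk row).get? "cells").getD []

-- A's inner 'for row in rows[:8]: … break' loop for one column index
def pvHeaderFor (col_idx : Int) : List (List (String × List (Option String))) → String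
  | [] => ""
  | r :: rest =>
    let cells := pvGetCells r
    if col_idx < (cells.length : Int) then
      let val := PySem.Str.strip (((PySem.List.pyGet? cells col_idx).getD none).getD "")
      if val ≠ "" then val else pvHeaderFor col_idx rest
    else pvHeaderFor col_idx rest

def extract_column_headers_py (rows : List (List (String × List (Option String)))) (max_cols : Int) : List String :=
  (PySem.List.pyRange 0 max_cols 1).foldl
    (fun acc col_idx => acc ++ [pvHeaderFor col_idx (PySem.List.slice rows none (some 8))]) []

-- ===== PORT B =====

-- B's inner loop: for col_idx, cell in enumerate(cells[:n]): overwrite if non-empty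
def pvApplyRow (row : List (String × List (Option String))) (n : Int) (acc : List String) : List String :=
  let cells := pvGetCells row
  (PySem.List.enumerate (PySem.List.slice cells none (some n)) 0).foldl
    (fun acc p =>
      let val := PySem.Str.strip (p.2.getD "")
      if val ≠ "" then PySem.List.pySetD acc p.1 val else acc) acc

def extract_column_headers_py_alt (rows : List (List (String × List (Option String)))) (max_cols : Int) : List String :=
  let n := max max_cols 0
  ((PySem.List.slice rows none (some 8)).reverse).foldl
    (fun acc row => pvApplyRow row n acc) (List.replicate n.toNat "")

-- ===== PRECONDITION & SPEC =====
def Spec_extract_column_headers_py (rows : List (List (String × List (Option String)))) (max_cols : Int) (out : List String) : Prop := out = extract_column_headers_py_alt rows max_cols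
instance (rows : List (List (String × List (Option String)))) (max_cols : Int) (out : List String) : Decidable (Spec_extract_column_headers_py rows max_cols out) := by unfold Spec_extract_column_headers_py; infer_instance

-- ===== CLAIM (what is proved, stated in full; the proofs are below) =====
def Claim_equal_extract_column_headers_py : Prop := ∀ (rows : List (List (String × List (Option String)))) (max_cols : Int), Dom_extract_column_headers_py rows max_cols → Spec_extract_column_headers_py rows max_cols (extract_column_headers_py rows max_cols)

-- ===== LEMMAS AND PROOFS =====

-- the value B writes for cell k of a row (none = leave the accumulator alone)
def pvCellVal (cs : List (Option String)) (k : Nat) : Option String :=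
  match cs[k]? with
  | none => none
  | some c => let v := PySem.Str.strip (c.getD ""); if v = "" then none else some v

-- abbreviation for B's inner fold starting at enumerate index s
def pvInner (cs : List (Option String)) (s : Int) (acc : List String) : List String :=
  (PySem.List.enumerate cs s).foldl
    (fun acc p =>
      let val := PySem.Str.strip (p.2.getD "")
      if val ≠ "" then PySem.List.pySetD acc p.1 val else acc) acc

theorem foldl_eq_pvInner (cs : List (Option String)) (s : Int) (acc : List String) :
    (PySem.List.enumerate cs s).foldl
      (fun acc p =>
        let val := PySem.Str.strip (p.2.getD "")
        if val ≠ "" then PySem.List.pySetD acc p.1 val else acc) acc = pvInner cs s acc := rfl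

theorem pvInner_cons (c : Option String) (cs : List (Option String)) (s : Nat) (acc : List String) :
    pvInner (c :: cs) (s : Int) acc =
      pvInner cs ((s + 1 : Nat) : Int)
        (if PySem.Str.strip (c.getD "") ≠ ""
         then acc.set s (PySem.Str.strip (c.getD "")) else acc) := by
  simp only [pvInner, PySem.List.enumerate_cons, List.foldl_cons]
  have hc : ((s : Int) + 1) = ((s + 1 : Nat) : Int) := by push_cast; ring
  rw [hc]
  congr 1
  split <;> simp [PySem.List.pySetD_natCast]

theorem pvInner_length (cs : List (Option String)) (s : Nat) (acc : List String) :
    (pvInner cs (s : Int) acc).length = acc.length := by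
  induction cs generalizing s acc with
  | nil => simp [pvInner, PySem.List.enumerate_nil]
  | cons c cs ih =>
    rw [pvInner_cons, ih]
    split <;> simp

theorem pvInner_get_lt (cs : List (Option String)) (s : Nat) (acc : List String)
    (j : Nat) (hj : j < s) :
    (pvInner cs (s : Int) acc)[j]? = acc[j]? := by
  induction cs generalizing s acc with
  | nil => simp [pvInner, PySem.List.enumerate_nil]
  | cons c cs ih =>
    rw [pvInner_cons, ih (s + 1) _ (by omega)]
    split
    · rw [List.getElem?_set_ne (by omega)]
    · rfl

theorem pvInner_get_hit (cs : List (Option String)) (s : Nat) (acc : List String)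
    (hlen : s + cs.length ≤ acc.length) (k : Nat) (v : String)
    (hv : pvCellVal cs k = some v) :
    (pvInner cs (s : Int) acc)[s + k]? = some v := by
  induction cs generalizing s acc k with
  | nil => simp [pvCellVal] at hv
  | cons c cs ih =>
    rw [pvInner_cons]
    cases k with
    | zero =>
      simp only [pvCellVal, List.getElem?_cons_zero] at hv
      by_cases h : PySem.Str.strip (c.getD "") = ""
      · simp [h] at hv
      · simp only [if_neg h] at hv
        obtain rfl : v = PySem.Str.strip (c.getD "") := (Option.some.inj hv).symm
        simp only [Nat.add_zero]
        rw [pvInner_get_lt cs (s + 1) _ s (by omega), if_pos h,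
            List.getElem?_set_self (by simp at hlen; omega)]
    | succ k =>
      have hv' : pvCellVal cs k = some v := by simpa [pvCellVal] using hv
      have hrw : s + (k + 1) = (s + 1) + k := by omega
      rw [hrw]
      split
      · exact ih (s + 1) _ (by simp at hlen ⊢; omega) k hv'
      · exact ih (s + 1) _ (by simp at hlen ⊢; omega) k hv'

theorem pvInner_get_skip (cs : List (Option String)) (s : Nat) (acc : List String)
    (j : Nat) (hj : ∀ k : Nat, j = s + k → pvCellVal cs k = none) :
    (pvInner cs (s : Int) acc)[j]? = acc[j]? := by
  induction cs generalizing s acc with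
  | nil => simp [pvInner, PySem.List.enumerate_nil]
  | cons c cs ih =>
    have hrest : ∀ k : Nat, j = (s + 1) + k → pvCellVal cs k = none := by
      intro k hk
      have := hj (k + 1) (by omega)
      simpa [pvCellVal] using this
    rw [pvInner_cons, ih (s + 1) _ hrest]
    split
    · rename_i h
      rcases eq_or_ne j s with rfl | hjs
      · exfalso
        have h0 := hj 0 (by omega)
        simp only [pvCellVal, List.getElem?_cons_zero] at h0
        split at h0
        · rename_i h0'; exact h h0'
        · simp at h0
      · rw [List.getElem?_set_ne (by omega)]
    · rfl

-- B writes exactly pvCellVal at each index of one row (indices inside the accumulator)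
theorem pvApplyRow_get (row : List (String × List (Option String))) (n : Int)
    (acc : List String) (k : Nat)
    (hlen : (PySem.List.slice (pvGetCells row) none (some n)).length ≤ acc.length) :
    (pvApplyRow row n acc)[k]? =
      match pvCellVal (PySem.List.slice (pvGetCells row) none (some n)) k with
      | some v => some v
      | none => acc[k]? := by
  unfold pvApplyRow
  rw [show ((0 : Int) = ((0 : Nat) : Int)) from rfl, foldl_eq_pvInner]
  rcases h : pvCellVal (PySem.List.slice (pvGetCells row) none (some n)) k with _ | v
  · exact pvInner_get_skip _ 0 acc k (fun k' hk' => by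
      have : k' = k := by omega
      rwa [this])
  · have := pvInner_get_hit _ 0 acc (by simpa using hlen) k v h
    simpa using this

theorem pvApplyRow_length (row : List (String × List (Option String))) (n : Int)
    (acc : List String) : (pvApplyRow row n acc).length = acc.length := by
  unfold pvApplyRow
  rw [show ((0 : Int) = ((0 : Nat) : Int)) from rfl, foldl_eq_pvInner, pvInner_length]

theorem pvB_length (rows8 : List (List (String × List (Option String)))) (n : Int) :
    (rows8.foldr (fun row acc => pvApplyRow row n acc) (List.replicate n.toNat "")).length
      = n.toNat := by
  induction rows8 with
  | nil => simp
  | cons r rest ih => simp [pvApplyRow_length, ih]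

-- the row-major back-to-front fold agrees pointwise with A's per-column scan
theorem pvB_get (rows8 : List (List (String × List (Option String)))) (n : Int)
    (hn : 0 ≤ n) (k : Nat) (hk : k < n.toNat) :
    (rows8.foldr (fun row acc => pvApplyRow row n acc) (List.replicate n.toNat ""))[k]?
      = some (pvHeaderFor (k : Int) rows8) := by
  induction rows8 with
  | nil => simp [List.getElem?_replicate_of_lt hk, pvHeaderFor]
  | cons r rest ih =>
    simp only [List.foldr_cons]
    have hlen : (PySem.List.slice (pvGetCells r) none (some n)).length
        ≤ (rest.foldr (fun row acc => pvApplyRow row n acc) (List.replicate n.toNat "")).length := by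
      rw [PySem.List.slice_to _ hn, pvB_length]
      exact le_trans (List.length_take_le _ _) le_rfl |>.trans (by simp)
    rw [pvApplyRow_get _ _ _ _ hlen]
    rw [PySem.List.slice_to _ hn]
    by_cases hkc : k < (pvGetCells r).length
    · have hget : ((pvGetCells r).take n.toNat)[k]? = some ((pvGetCells r)[k]) := by
        rw [List.getElem?_take_of_lt hk, List.getElem?_eq_getElem hkc]
      by_cases hval : PySem.Str.strip (((pvGetCells r)[k]).getD "") = ""
      · have hcv : pvCellVal ((pvGetCells r).take n.toNat) k = none := by
          simp [pvCellVal, hget, hval]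
        rw [hcv, ih, pvHeaderFor]
        simp only [PySem.List.pyGet?_natCast, List.getElem?_eq_getElem hkc, Option.getD_some]
        rw [if_pos (by exact_mod_cast hkc), if_neg (by simpa using hval)]
      · have hcv : pvCellVal ((pvGetCells r).take n.toNat) k
            = some (PySem.Str.strip (((pvGetCells r)[k]).getD "")) := by
          simp [pvCellVal, hget, hval]
        rw [hcv]
        conv_rhs => rw [pvHeaderFor]
        simp only [PySem.List.pyGet?_natCast, List.getElem?_eq_getElem hkc, Option.getD_some]
        rw [if_pos (by exact_mod_cast hkc), if_pos (by simpa using hval)]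
    · have hcv : pvCellVal ((pvGetCells r).take n.toNat) k = none := by
        have : ((pvGetCells r).take n.toNat)[k]? = none := by
          rw [List.getElem?_take_of_lt hk, List.getElem?_eq_none (by omega)]
        simp [pvCellVal, this]
      rw [hcv, ih]
      conv_rhs => rw [pvHeaderFor]
      rw [if_neg (by omega)]

theorem extract_column_headers_py_spec : Claim_equal_extract_column_headers_py := by
  intro rows max_cols _dom
  unfold Spec_extract_column_headers_py extract_column_headers_py extract_column_headers_py_alt
  rw [PySem.List.foldl_append_singleton_eq_map, List.nil_append, List.foldl_reverse]
  apply List.ext_getElem?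
  intro i
  by_cases hi : i < max_cols.toNat
  · rw [pvB_get _ _ (by positivity) i (by simp; omega)]
    rw [List.getElem?_map, PySem.List.getElem?_pyRange_one]
    rw [if_pos (by omega)]
    simp
  · rw [List.getElem?_eq_none (by
        simp only [List.length_map, PySem.List.length_pyRange_one]; omega),
        List.getElem?_eq_none (by rw [pvB_length]; omega)]
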